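-- pv_equiv track=rewrite | github.com/1rc2/hill-cipher | pages/5_置换密码.py | get_column_order
-- ===== SOURCE A (Python) =====
-- def text_to_clean(text):
--     text = text.upper().replace(" ", "")
--     return ''.join([c for c in text if c.isalpha()])
--
-- def get_column_order(keyword):
--     keyword = text_to_clean(keyword)
--     sorted_chars = sorted(list(keyword))
--     order = []
--     for char in keyword:
--         order.append(sorted_chars.index(char) + 1)
--         sorted_chars[sorted_chars.index(char)] = None
--     return order
-- ===== SOURCE B (Python) =====
-- def get_column_order(keyword):
--     s = ''.join(c for c in keyword.upper() if c.isalpha())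
--     cnt = {}
--     for c in s:
--         cnt[c] = cnt.get(c, 0) + 1
--     start = {}
--     acc = 1
--     for c in sorted(cnt):
--         start[c] = acc
--         acc += cnt[c]
--     order = []
--     for c in s:
--         order.append(start[c])
--         start[c] += 1
--     return order
-- ===== Notes on version B (the rewrite author's own statement) =====
-- stated objective: faster
-- what changed: A repeatedly scans a sorted copy with list.index and None-s out used slots (quadratic); B builds a character-count dict, assigns each distinct letter its rank start in one pass over the sorted distinct letters, then emits ranks in a single pass, incrementing the start on each use.
import Mathlib
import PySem

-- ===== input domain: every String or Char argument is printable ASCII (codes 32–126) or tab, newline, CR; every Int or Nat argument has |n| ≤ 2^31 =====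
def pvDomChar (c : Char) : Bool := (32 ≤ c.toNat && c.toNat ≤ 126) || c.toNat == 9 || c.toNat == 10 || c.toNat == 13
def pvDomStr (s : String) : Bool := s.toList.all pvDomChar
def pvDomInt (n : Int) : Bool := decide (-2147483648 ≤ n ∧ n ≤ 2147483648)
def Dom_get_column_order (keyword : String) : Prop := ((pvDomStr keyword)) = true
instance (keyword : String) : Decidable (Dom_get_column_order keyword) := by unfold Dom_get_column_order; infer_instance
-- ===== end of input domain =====

-- B replaces A's quadratic repeated `sorted_chars.index` scans by a counting-sort ranking
-- (a count dict, rank starts per character in sorted key order, then one pass); objective: faster.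

-- ===== PORT A =====
-- text_to_clean: upper, remove spaces, keep alphabetic ('' .join of the kept single chars = filter)
def text_to_clean (text : String) : List Char :=
  (PySem.Chars.replace (PySem.Chars.upper text.toList) [' '] []).filter PySem.Chars.isalpha

-- the loop body: sorted_chars.index(char) is computed, appended (+1), and that slot set to None
-- (Python computes .index twice on the unchanged list — same value; `none` case = ValueError, unreachable)
def aLoop : List Char → List (Option Char) → List Int → List Int
  | [], _, order => order
  | c :: rest, sc, order =>
    match PySem.List.index? sc (some c) with
    | some k => aLoop rest (PySem.List.pySetD sc (k : Int) none) (order ++ [(k : Int) + 1])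
    | none => aLoop rest sc order

def get_column_order (keyword : String) : List Int :=
  let kw := text_to_clean keyword
  let sorted_chars := (PySem.List.sorted kw (fun c => c)).map some
  aLoop kw sorted_chars []

-- ===== PORT B =====
def bClean (keyword : String) : List Char :=
  (PySem.Chars.upper keyword.toList).filter PySem.Chars.isalpha

def bCount (s : List Char) : PySem.Dict Char Int :=
  s.foldl (fun d c => d.insert c (d.getD c 0 + 1)) PySem.Dict.empty

-- start[c] = acc; acc += cnt[c]  over sorted(cnt)   (cnt[c]: key always present; getD is its total form)
def bStart (s : List Char) : PySem.Dict Char Int :=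
  ((PySem.List.sorted (bCount s).keys (fun c => c)).foldl
    (fun (p : PySem.Dict Char Int × Int) c => (p.1.insert c p.2, p.2 + (bCount s).getD c 0))
    (PySem.Dict.empty, 1)).1

-- order.append(start[c]); start[c] += 1   (start[c]: key always present; getD is its total form)
def get_column_order_alt (keyword : String) : List Int :=
  let s := bClean keyword
  (s.foldl (fun (p : PySem.Dict Char Int × List Int) c =>
      (p.1.insert c (p.1.getD c 0 + 1), p.2 ++ [p.1.getD c 0])) (bStart s, [])).2

-- ===== PRECONDITION & SPEC =====
def Spec_get_column_order (keyword : String) (out : List Int) : Prop := out = get_column_order_alt keyword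
instance (keyword : String) (out : List Int) : Decidable (Spec_get_column_order keyword out) := by unfold Spec_get_column_order; infer_instance

-- ===== CLAIM (what is proved, stated in full; the proofs are below) =====
def Claim_equal_get_column_order : Prop := ∀ (keyword : String), Dom_get_column_order keyword → Spec_get_column_order keyword (get_column_order keyword)

-- ===== LEMMAS AND PROOFS =====

theorem countP_lt_add_count (l : List Char) (c : Char) :
    l.countP (fun a => decide (a < c)) + l.count c = l.countP (fun a => decide (a ≤ c)) := by
  induction l with
  | nil => simp
  | cons h t ih =>
    simp only [List.countP_cons, List.count_cons]
    rcases lt_trichotomy h c with hlt | heq | hgt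
    · have h1 : h ≤ c := le_of_lt hlt
      have h2 : ¬ (h = c) := ne_of_lt hlt
      simp [hlt, h1, h2]; omega
    · subst heq; simp; omega
    · have h1 : ¬ (h < c) := not_lt.2 (le_of_lt hgt)
      have h2 : ¬ (h ≤ c) := not_le.2 hgt
      have h3 : ¬ (h = c) := (ne_of_gt hgt)
      simp [h1, h2, h3]; omega

theorem drop_countP_eq_zero (t : List Char) (p : Char → Bool) (j : ℕ)
    (h : ∀ i (hi : i < t.length), j ≤ i → p t[i] = false) :
    (t.drop j).countP p = 0 := by
  rw [List.countP_eq_zero]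
  intro a ha
  obtain ⟨i, hi, rfl⟩ := List.mem_iff_getElem.1 ha
  have hlen : (t.drop j).length = t.length - j := by simp
  have hji : j + i < t.length := by omega
  rw [List.getElem_drop]
  simp [h (j+i) hji (by omega)]

theorem take_countP_eq_length (t : List Char) (p : Char → Bool) (n : ℕ)
    (h : ∀ i (hi : i < t.length), i < n → p t[i] = true) :
    (t.take n).countP p = (t.take n).length := by
  rw [List.countP_eq_length]
  intro a ha
  obtain ⟨i, hi, rfl⟩ := List.mem_iff_getElem.1 ha
  have hlen : (t.take n).length = min n t.length := by simp
  rw [List.getElem_take]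
  exact h i (by omega) (by omega)

theorem countP_split (t : List Char) (p : Char → Bool) (j : ℕ) :
    t.countP p = (t.take j).countP p + (t.drop j).countP p := by
  conv_lhs => rw [← List.take_append_drop j t]
  exact List.countP_append ..

theorem sorted_block (t : List Char) (ht : t.Pairwise (· ≤ ·)) (j : ℕ) (hj : j < t.length) (c : Char) :
    t[j] = c ↔ (t.countP (fun a => decide (a < c)) ≤ j ∧
      j < t.countP (fun a => decide (a < c)) + t.count c) := by
  have hmono : ∀ i k (hi : i < t.length) (hk : k < t.length), i ≤ k → t[i] ≤ t[k] := by
    intro i k hi hk hik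
    rcases eq_or_lt_of_le hik with rfl | h
    · exact le_refl _
    · exact List.pairwise_iff_getElem.1 ht i k hi hk h
  have htake : ∀ n, (t.take n).length ≤ n := fun n => by simp
  have hclc := countP_lt_add_count t c
  constructor
  · intro hc
    constructor
    · have hs := countP_split t (fun a => decide (a < c)) j
      have hd : (t.drop j).countP (fun a => decide (a < c)) = 0 := by
        apply drop_countP_eq_zero
        intro i hi hji
        have := hmono j i hj hi hji
        rw [hc] at this
        simp [not_lt.2 this]
      have hle := List.countP_le_length (l := t.take j) (p := fun a => decide (a < c))
      have := htake j
      omega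
    · have hall : (t.take (j+1)).countP (fun a => decide (a ≤ c)) = (t.take (j+1)).length := by
        apply take_countP_eq_length
        intro i hi hij
        have := hmono i j hi hj (by omega)
        rw [hc] at this
        simp [this]
      have hlen : (t.take (j+1)).length = j+1 := by simp; omega
      have hsub := (List.take_sublist (j+1) t).countP_le (p := fun a => decide (a ≤ c))
      omega
  · intro ⟨h1, h2⟩
    rcases lt_trichotomy t[j] c with hlt | heq | hgt
    · exfalso
      have hall : (t.take (j+1)).countP (fun a => decide (a < c)) = (t.take (j+1)).length := by
        apply take_countP_eq_length
        intro i hi hij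
        have := hmono i j hi hj (by omega)
        simp [lt_of_le_of_lt this hlt]
      have hlen : (t.take (j+1)).length = j+1 := by simp; omega
      have hsub := (List.take_sublist (j+1) t).countP_le (p := fun a => decide (a < c))
      omega
    · exact heq
    · exfalso
      have hs := countP_split t (fun a => decide (a ≤ c)) j
      have hd : (t.drop j).countP (fun a => decide (a ≤ c)) = 0 := by
        apply drop_countP_eq_zero
        intro i hi hji
        have := hmono j i hj hi hji
        simp [not_le.2 (lt_of_lt_of_le hgt this)]
      have hle := List.countP_le_length (l := t.take j) (p := fun a => decide (a ≤ c))
      have := htake j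
      omega

def blank (t p : List Char) : List (Option Char) :=
  t.zipIdx.map (fun q => if q.2 < t.countP (fun a => decide (a < q.1)) + p.count q.1 then none else some q.1)

theorem blank_length (t p : List Char) : (blank t p).length = t.length := by simp [blank]

theorem blank_getElem (t p : List Char) (j : ℕ) (hj : j < t.length) :
    (blank t p)[j]'(by rw [blank_length]; exact hj) =
      if j < t.countP (fun a => decide (a < t[j])) + p.count t[j] then none else some t[j] := by
  simp [blank]

theorem blank_nil (t : List Char) (ht : t.Pairwise (· ≤ ·)) : blank t [] = t.map some := by
  apply List.ext_getElem
  · simp [blank_length]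
  · intro j hj hj'
    have hjt : j < t.length := by rw [blank_length] at hj; exact hj
    rw [blank_getElem t [] j hjt]
    have hblock := (sorted_block t ht j hjt t[j]).1 rfl
    simp only [List.count_nil, Nat.add_zero]
    rw [if_neg (by omega)]
    simp

theorem lt_length_of_count (t : List Char) (c : Char) (k : ℕ) (hk : k < t.count c) :
    t.countP (fun a => decide (a < c)) + k < t.length := by
  have h1 := countP_lt_add_count t c
  have h2 := List.countP_le_length (l := t) (p := fun a => decide (a ≤ c))
  omega

theorem index_blank (t p : List Char) (c : Char) (ht : t.Pairwise (· ≤ ·))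
    (hc : p.count c < t.count c) :
    PySem.List.index? (blank t p) (some c) = some (t.countP (fun a => decide (a < c)) + p.count c) := by
  set L := t.countP (fun a => decide (a < c)) with hL
  set k := p.count c with hk
  have hlen : L + k < t.length := lt_length_of_count t c k hc
  have hblen : L + k < (blank t p).length := by rw [blank_length]; exact hlen
  have htj : t[L+k] = c := by
    rw [sorted_block t ht (L+k) hlen c]
    omega
  have hmid : (blank t p)[L+k]'hblen = some c := by
    rw [blank_getElem t p (L+k) hlen, htj]
    rw [if_neg (by omega)]
  rw [PySem.List.index?_eq_some_iff]
  refine ⟨(blank t p).take (L+k), (blank t p).drop (L+k+1), ?_, ?_, ?_⟩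
  · rw [← hmid, List.getElem_cons_drop hblen, List.take_append_drop]
  · simp [blank_length]; omega
  · intro hmem
    obtain ⟨i, hi, hival⟩ := List.mem_iff_getElem.1 hmem
    have hitake : ((blank t p).take (L+k)).length = L + k := by simp [blank_length]; omega
    have hi' : i < L + k := by omega
    have hit : i < t.length := by omega
    rw [List.getElem_take] at hival
    rw [blank_getElem t p i hit] at hival
    by_cases hcond : i < t.countP (fun a => decide (a < t[i])) + p.count t[i]
    · rw [if_pos hcond] at hival; simp at hival
    · rw [if_neg hcond] at hival
      have hti : t[i] = c := Option.some.inj hival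
      rw [hti] at hcond
      exact hcond (by omega)

theorem set_blank (t p : List Char) (c : Char) (ht : t.Pairwise (· ≤ ·))
    (hc : p.count c < t.count c) :
    PySem.List.pySetD (blank t p) ((t.countP (fun a => decide (a < c)) + p.count c : ℕ) : Int) none
      = blank t (p ++ [c]) := by
  set L := t.countP (fun a => decide (a < c)) with hL
  set k := p.count c with hk
  have hlen : L + k < t.length := lt_length_of_count t c k hc
  have hblen : L + k < (blank t p).length := by rw [blank_length]; exact hlen
  have hset : PySem.List.pySetD (blank t p) ((L + k : ℕ) : Int) none = (blank t p).set (L+k) none := by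
    have h0 : (0:Int) ≤ ((L:Int) + (k:Int)) := by positivity
    have h1 : ((L:Int) + (k:Int)) < ((blank t p).length : Int) := by exact_mod_cast hblen
    have h2 : ((L:Int) + (k:Int)).toNat = L + k := by omega
    simp [PySem.List.pySetD, PySem.List.pySet?, PySem.List.pyIdx?, h0, h1, h2]
  rw [hset]
  apply List.ext_getElem
  · simp [blank_length]
  · intro j hj hj'
    have hjt : j < t.length := by simp [blank_length] at hj; exact hj
    rw [List.getElem_set, blank_getElem t p j hjt, blank_getElem t (p ++ [c]) j hjt]
    have hcount : ∀ x : Char, (p ++ [c]).count x = p.count x + (if x = c then 1 else 0) := by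
      intro x
      by_cases hx : x = c
      · subst hx; simp [List.count_append]
      · simp [List.count_append, hx, List.count_singleton]; exact fun h => hx h.symm
    by_cases hje : L + k = j
    · subst hje
      have htj : t[L+k] = c := by rw [sorted_block t ht (L+k) hlen c]; omega
      rw [if_pos rfl, htj, hcount c, if_pos rfl, if_pos (by omega)]
    · rw [if_neg hje]
      by_cases htj : t[j] = c
      · have hblock := (sorted_block t ht j hjt c).1 htj
        rw [htj, hcount c, if_pos rfl]
        by_cases hlt : j < L + k
        · rw [if_pos (by omega), if_pos (by omega)]
        · rw [if_neg (by omega), if_neg (by omega)]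
      · rw [hcount t[j], if_neg htj]; simp

def ranksGo (s : List Char) : List Char → List Char → List Int
  | _, [] => []
  | p, c :: rest =>
    ((s.countP (fun a => decide (a < c)) : Int) + (p.count c : Int) + 1) :: ranksGo s (p ++ [c]) rest

theorem aLoop_eq (kw : List Char) (rest p : List Char) (order : List Int)
    (hsplit : kw = p ++ rest) :
    aLoop rest (blank (PySem.List.sorted kw (fun c => c)) p) order
      = order ++ ranksGo kw p rest := by
  induction rest generalizing p order with
  | nil => simp [aLoop, ranksGo]
  | cons c rest' ih =>
    set t := PySem.List.sorted kw (fun c => c) with hT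
    have ht : t.Pairwise (· ≤ ·) := PySem.List.sorted_pairwise kw (fun c => c)
    have hperm : t.Perm kw := PySem.List.sorted_perm kw (fun c => c) false
    have hcount : t.count c = kw.count c := hperm.count_eq c
    have hcp : t.countP (fun a => decide (a < c)) = kw.countP (fun a => decide (a < c)) :=
      hperm.countP_eq _
    have hc : p.count c < t.count c := by
      rw [hcount, hsplit, List.count_append, List.count_cons_self]
      omega
    rw [aLoop, index_blank t p c ht hc]
    dsimp only
    rw [set_blank t p c ht hc]
    rw [ih (p ++ [c]) _ (by rw [hsplit, List.append_assoc]; rfl)]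
    rw [ranksGo]
    rw [List.append_assoc]
    congr 1
    simp only [List.singleton_append, hcp]
    push_cast
    ring_nf

theorem a_eq_ranks (kw : List Char) :
    aLoop kw ((PySem.List.sorted kw (fun c => c)).map some) []
      = ranksGo kw [] kw := by
  have := aLoop_eq kw kw [] [] (by simp)
  rw [blank_nil _ (PySem.List.sorted_pairwise kw (fun c => c))] at this
  simpa using this

theorem bCount_getD (s : List Char) (c : Char) : (bCount s).getD c 0 = (s.count c : Int) := by
  unfold bCount
  rw [PySem.Dict.getD_foldl_insert_add_one, PySem.Dict.getD_empty]
  simp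

theorem bCount_keys (s : List Char) : (bCount s).keys = PySem.Set.ofList s := by
  unfold bCount
  rw [PySem.Dict.keys_foldl_insert, PySem.Dict.keys_empty]
  rfl

theorem fold_start_not_mem (ks : List Char) (cnt : Char → Int) (d : PySem.Dict Char Int)
    (acc : Int) (c : Char) (hc : c ∉ ks) :
    ((ks.foldl (fun (p : PySem.Dict Char Int × Int) x => (p.1.insert x p.2, p.2 + cnt x)) (d, acc)).1).getD c 0
      = d.getD c 0 := by
  induction ks generalizing d acc with
  | nil => rfl
  | cons k ks' ih =>
    simp only [List.foldl_cons]
    rw [ih _ _ (fun h => hc (List.mem_cons_of_mem _ h))]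
    exact PySem.Dict.getD_insert_of_ne d _ _ (fun h => hc (h ▸ List.mem_cons_self))

theorem fold_start_getD (ks : List Char) (cnt : Char → Int) (d : PySem.Dict Char Int)
    (acc : Int) (c : Char) (hk : ks.Pairwise (· < ·)) (hc : c ∈ ks) :
    ((ks.foldl (fun (p : PySem.Dict Char Int × Int) x => (p.1.insert x p.2, p.2 + cnt x)) (d, acc)).1).getD c 0
      = acc + ((ks.filter (fun x => decide (x < c))).map cnt).sum := by
  induction ks generalizing d acc with
  | nil => exact absurd hc (List.not_mem_nil)
  | cons k ks' ih =>
    have hlt : ∀ x ∈ ks', k < x := fun x hx => (List.pairwise_cons.1 hk).1 x hx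
    simp only [List.foldl_cons]
    rcases List.mem_cons.1 hc with rfl | hc'
    · rw [fold_start_not_mem _ _ _ _ c (fun h => lt_irrefl c (hlt c h))]
      rw [PySem.Dict.getD_insert_self]
      have hfil : (c :: ks').filter (fun x => decide (x < c)) = [] := by
        rw [List.filter_eq_nil_iff]
        intro x hx
        rcases List.mem_cons.1 hx with rfl | hx'
        · simp
        · simp [not_lt.2 (le_of_lt (hlt x hx'))]
      rw [hfil]
      simp
    · rw [ih _ _ (List.pairwise_cons.1 hk).2 hc']
      have hkc : k < c := hlt c hc'
      rw [List.filter_cons_of_pos (by simp [hkc])]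
      simp only [List.map_cons, List.sum_cons]
      ring

theorem countP_mem_cons (s : List Char) (x : Char) (ds : List Char) (hx : x ∉ ds) :
    s.countP (fun a => decide (a ∈ x :: ds)) = s.count x + s.countP (fun a => decide (a ∈ ds)) := by
  induction s with
  | nil => simp
  | cons a s' ih =>
    simp only [List.countP_cons, List.count_cons, ih]
    by_cases hax : a = x
    · subst hax
      simp [hx]
      omega
    · by_cases hads : a ∈ ds
      · simp [hads, hax, List.mem_cons]
        ring
      · have : ¬ (a ∈ x :: ds) := by
          rw [List.mem_cons]; rintro (h | h) <;> [exact hax h; exact hads h]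
        simp [hads, hax, this]

theorem sum_counts (s ds : List Char) (hnd : ds.Nodup) :
    (ds.map (fun x => s.count x)).sum = s.countP (fun a => decide (a ∈ ds)) := by
  induction ds with
  | nil => simp
  | cons x ds' ih =>
    have hx : x ∉ ds' := (List.nodup_cons.1 hnd).1
    rw [List.map_cons, List.sum_cons, ih (List.nodup_cons.1 hnd).2, countP_mem_cons s x ds' hx]

theorem bStart_getD (s : List Char) (c : Char) (hc : c ∈ s) :
    (bStart s).getD c 0 = (s.countP (fun a => decide (a < c)) : Int) + 1 := by
  unfold bStart
  set ks := PySem.List.sorted (bCount s).keys (fun c => c) with hks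
  have hkeys := bCount_keys s
  have hknodup : ks.Pairwise (· < ·) := by
    rw [hks, hkeys]
    exact PySem.List.sorted_ofList_pairwise_lt s
  have hcmem : c ∈ ks := by
    rw [hks, PySem.List.mem_sorted, hkeys, PySem.Set.mem_ofList]
    exact hc
  rw [PySem.List.foldl_congr_mem _ _
    (fun (p : PySem.Dict Char Int × Int) x => (p.1.insert x p.2, p.2 + (s.count x : Int))) _
    (fun acc x hx => by rw [bCount_getD])]
  rw [fold_start_getD ks _ _ _ c hknodup hcmem]
  have hnd : (ks.filter (fun x => decide (x < c))).Nodup :=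
    (List.Nodup.filter _ (hknodup.imp ne_of_lt))
  have hmap : (ks.filter (fun x => decide (x < c))).map (fun x => (s.count x : Int))
      = ((ks.filter (fun x => decide (x < c))).map (fun x => s.count x)).map Nat.cast := by
    rw [List.map_map]
    rfl
  rw [hmap, ← Nat.cast_list_sum, sum_counts s _ hnd]
  have hcp : s.countP (fun a => decide (a ∈ ks.filter (fun x => decide (x < c))))
      = s.countP (fun a => decide (a < c)) := by
    apply List.countP_congr
    intro a ha
    simp only [decide_eq_true_eq, List.mem_filter, hks, PySem.List.mem_sorted, hkeys,
      PySem.Set.mem_ofList, decide_eq_true_eq]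
    constructor
    · rintro ⟨_, h⟩; exact h
    · intro h; exact ⟨ha, h⟩
  rw [hcp]
  ring

theorem bLoop_eq (s : List Char) (rest p : List Char) (d : PySem.Dict Char Int) (out : List Int)
    (hd : ∀ x ∈ rest, d.getD x 0 = (s.countP (fun a => decide (a < x)) : Int) + (p.count x : Int) + 1) :
    (rest.foldl (fun (q : PySem.Dict Char Int × List Int) c =>
        (q.1.insert c (q.1.getD c 0 + 1), q.2 ++ [q.1.getD c 0])) (d, out)).2
      = out ++ ranksGo s p rest := by
  induction rest generalizing p d out with
  | nil => simp [ranksGo]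
  | cons c rest' ih =>
    simp only [List.foldl_cons]
    have hdc := hd c List.mem_cons_self
    rw [ih (p ++ [c]) _ _ ?_]
    · rw [ranksGo, hdc]
      rw [List.append_assoc]
      simp
    · intro x hx
      rw [PySem.Dict.getD_insert]
      by_cases hxc : x = c
      · subst hxc
        rw [if_pos rfl, hdc, List.count_append]
        simp
        ring
      · rw [if_neg hxc, hd x (List.mem_cons_of_mem _ hx), List.count_append]
        have : List.count x [c] = 0 := by simp [List.count_singleton]; exact fun h => hxc h.symm
        rw [this]
        simp

theorem b_eq_ranks (keyword : String) :
    get_column_order_alt keyword = ranksGo (bClean keyword) [] (bClean keyword) := by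
  unfold get_column_order_alt
  rw [bLoop_eq (bClean keyword) (bClean keyword) [] (bStart (bClean keyword)) []
    (fun x hx => by rw [bStart_getD _ x hx]; simp)]
  simp

theorem replace_space_go (fuel : ℕ) (l acc : List Char) (h : l.length ≤ fuel) :
    PySem.Chars.replace.go [' '] [] fuel l acc = acc.reverse ++ l.filter (fun a => !(a == ' ')) := by
  induction fuel generalizing l acc with
  | zero =>
    have : l = [] := List.length_eq_zero_iff.1 (Nat.le_zero.1 h)
    subst this
    simp [PySem.Chars.replace.go]
  | succ fuel ih =>
    cases l with
    | nil => simp [PySem.Chars.replace.go]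
    | cons c t =>
      by_cases hc : c = ' '
      · subst hc
        have hpre : ([' '] : List Char).isPrefixOf (' ' :: t) = true := by simp [List.isPrefixOf]
        rw [PySem.Chars.replace.go, if_pos hpre]
        simp only [List.length_cons] at h
        rw [ih _ _ (by simpa using Nat.le_of_succ_le_succ h)]
        simp
      · have hpre : ([' '] : List Char).isPrefixOf (c :: t) = false := by
          simp [List.isPrefixOf]
          exact fun h => hc h.symm
        rw [PySem.Chars.replace.go, if_neg (by simp [hpre])]
        simp only [List.length_cons] at h
        rw [ih _ _ (Nat.le_of_succ_le_succ h)]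
        simp [hc]

theorem replace_space (cs : List Char) :
    PySem.Chars.replace cs [' '] [] = cs.filter (fun a => !(a == ' ')) := by
  rw [PySem.Chars.replace, if_neg (by simp)]
  rw [replace_space_go cs.length cs [] (le_refl _)]
  simp

theorem clean_eq (keyword : String) : text_to_clean keyword = bClean keyword := by
  unfold text_to_clean bClean
  rw [replace_space, List.filter_filter]
  apply List.filter_congr
  intro a _
  by_cases ha : a = ' '
  · subst ha; decide
  · simp [ha]

-- ===== VERDICT (by name: the statement is the Claim_ definition above) =====
theorem get_column_order_spec : Claim_equal_get_column_order := by
  intro keyword _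
  unfold Spec_get_column_order
  have ha : get_column_order keyword
      = ranksGo (text_to_clean keyword) [] (text_to_clean keyword) := by
    unfold get_column_order
    exact a_eq_ranks (text_to_clean keyword)
  rw [ha, b_eq_ranks, clean_eq]
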